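-- pv_equiv track=rewrite | github.com/f321x/nostr-subswap-provider-cln | swap-provider/plugin/utils.py | _descsum_expand
-- ===== SOURCE A (Python) =====
-- INPUT_CHARSET = "0123456789()[],'/*abcdefgh@:$%{}IJKLMNOPQRSTUVWXYZ&+-.;<=>?!^_|~ijklmnopqrstuvwxyzABCDEFGH`#\"\\ "
--
-- def _descsum_expand(s):
--     """Internal function that does the character to symbol expansion"""
--     groups = []
--     symbols = []
--     for c in s:
--         if not c in INPUT_CHARSET:
--             return None
--         v = INPUT_CHARSET.find(c)
--         symbols.append(v & 31)
--         groups.append(v >> 5)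
--         if len(groups) == 3:
--             symbols.append(groups[0] * 9 + groups[1] * 3 + groups[2])
--             groups = []
--     if len(groups) == 1:
--         symbols.append(groups[0])
--     elif len(groups) == 2:
--         symbols.append(groups[0] * 3 + groups[1])
--     return symbols
-- ===== SOURCE B (Python) =====
-- INPUT_CHARSET = "0123456789()[],'/*abcdefgh@:$%{}IJKLMNOPQRSTUVWXYZ&+-.;<=>?!^_|~ijklmnopqrstuvwxyzABCDEFGH`#\"\\ "
--
-- def _descsum_expand(s):
--     """Two-pass variant: index every char first, then emit symbols chunk by chunk."""
--     vals = []
--     for c in s: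
--         i = INPUT_CHARSET.find(c)
--         if i < 0:
--             return None
--         vals.append(i)
--     out = []
--     for i in range(0, len(vals), 3):
--         chunk = vals[i:i + 3]
--         for v in chunk:
--             out.append(v & 31)
--         g = [v >> 5 for v in chunk]
--         if len(chunk) == 3:
--             out.append(g[0] * 9 + g[1] * 3 + g[2])
--         elif len(chunk) == 2:
--             out.append(g[0] * 3 + g[1])
--         else:
--             out.append(g[0])
--     return out
-- ===== Notes on version B (the rewrite author's own statement) =====
-- stated objective: alternative
-- what changed: A interleaves lookup and group bookkeeping in one stateful loop (a groups accumulator flushed at size 3 plus a trailing fixup); B first maps the whole string to charset indices (early None on a miss) and then emits the output chunk-of-3 by chunk-of-3 with the checksum chosen by chunk length, so no running groups state exists.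
import Mathlib
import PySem

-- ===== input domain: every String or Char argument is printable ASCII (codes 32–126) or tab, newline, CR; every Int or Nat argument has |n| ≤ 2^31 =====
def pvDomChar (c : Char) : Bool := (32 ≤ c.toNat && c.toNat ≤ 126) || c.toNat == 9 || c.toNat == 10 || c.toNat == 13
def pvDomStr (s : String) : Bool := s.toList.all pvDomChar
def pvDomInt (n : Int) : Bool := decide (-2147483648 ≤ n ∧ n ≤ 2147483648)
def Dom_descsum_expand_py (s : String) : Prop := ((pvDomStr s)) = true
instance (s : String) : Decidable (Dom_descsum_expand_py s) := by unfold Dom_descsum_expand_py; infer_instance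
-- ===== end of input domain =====

-- B replaces A's stateful groups-accumulator loop by a two-pass index-then-chunk decomposition; objective: alternative (same cost).

def pvCharset : List Char := "0123456789()[],'/*abcdefgh@:$%{}IJKLMNOPQRSTUVWXYZ&+-.;<=>?!^_|~ijklmnopqrstuvwxyzABCDEFGH`#\"\\ ".toList

-- ===== PORT A =====
-- A's loop: state = (groups, symbols); after the loop the trailing partial group is flushed.
def descA_loop : List Char → List Int → List Int → Option (List Int)
  | [], groups, symbols =>
    if groups.length = 1 then some (symbols ++ [groups.getD 0 0])
    else if groups.length = 2 then some (symbols ++ [groups.getD 0 0 * 3 + groups.getD 1 0])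
    else some symbols
  | c :: cs, groups, symbols =>
    if PySem.Chars.isIn [c] pvCharset = false then none
    else
      let v : Int := PySem.Chars.find pvCharset [c]
      let symbols' := symbols ++ [PySem.Int.band v 31]
      let groups' := groups ++ [v >>> 5]
      if groups'.length = 3 then
        descA_loop cs [] (symbols' ++ [groups'.getD 0 0 * 9 + groups'.getD 1 0 * 3 + groups'.getD 2 0])
      else descA_loop cs groups' symbols'

def descsum_expand_py (s : String) : Option (List Int) :=
  descA_loop s.toList [] []

-- ===== PORT B =====
-- first pass: map every char to its charset index, None as soon as one is missing
def descB_vals : List Char → Option (List Int)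
  | [] => some []
  | c :: cs =>
    let i : Int := PySem.Chars.find pvCharset [c]
    if i < 0 then none
    else (descB_vals cs).map (i :: ·)

-- second pass: emit the symbols chunk-of-3 by chunk-of-3, checksum chosen by chunk length
def descB_chunks : List Int → List Int
  | [] => []
  | [a] => [PySem.Int.band a 31, a >>> 5]
  | [a, b] => [PySem.Int.band a 31, PySem.Int.band b 31, (a >>> 5) * 3 + (b >>> 5)]
  | a :: b :: c :: rest =>
    PySem.Int.band a 31 :: PySem.Int.band b 31 :: PySem.Int.band c 31 ::
      ((a >>> 5) * 9 + (b >>> 5) * 3 + (c >>> 5)) :: descB_chunks rest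

def descsum_expand_py_alt (s : String) : Option (List Int) :=
  (descB_vals s.toList).map descB_chunks

-- ===== PRECONDITION & SPEC =====
def Spec_descsum_expand_py (s : String) (out : Option (List Int)) : Prop := out = descsum_expand_py_alt s
instance (s : String) (out : Option (List Int)) : Decidable (Spec_descsum_expand_py s out) := by unfold Spec_descsum_expand_py; infer_instance

-- ===== CLAIM (what is proved, stated in full; the proofs are below) =====
def Claim_equal_descsum_expand_py : Prop := ∀ (s : String), Dom_descsum_expand_py s → Spec_descsum_expand_py s (descsum_expand_py s)

-- ===== LEMMAS AND PROOFS =====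

-- induction skeleton: three chars at a time
def pvChunk3Ind : List Char → Unit
  | [] => ()
  | [_] => ()
  | [_, _] => ()
  | _ :: _ :: _ :: rest => pvChunk3Ind rest

lemma pv_isIn_false_iff (c : Char) :
    (PySem.Chars.isIn [c] pvCharset = false) ↔ PySem.Chars.find pvCharset [c] < 0 := by
  rw [PySem.Chars.isIn_eq_false_iff, ← PySem.Chars.find_eq_neg_one_iff]
  have h := PySem.Chars.neg_one_le_find pvCharset [c]
  omega

lemma pv_key : ∀ (cs : List Char) (symbols : List Int),
    descA_loop cs [] symbols = (descB_vals cs).map (fun vs => symbols ++ descB_chunks vs) := by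
  intro cs
  induction cs using pvChunk3Ind.induct with
  | case1 => intro symbols; simp [descA_loop, descB_vals, descB_chunks]
  | case2 c =>
    intro symbols
    by_cases h : PySem.Chars.find pvCharset [c] < 0
    · simp [descA_loop, descB_vals, (pv_isIn_false_iff c).2 h, h]
    · have hin : ¬ (PySem.Chars.isIn [c] pvCharset = false) := by
        simp [pv_isIn_false_iff, h]
      simp [descA_loop, descB_vals, descB_chunks, hin, h]
  | case3 c d =>
    intro symbols
    by_cases h : PySem.Chars.find pvCharset [c] < 0
    · simp [descA_loop, descB_vals, (pv_isIn_false_iff c).2 h, h]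
    · have hin : ¬ (PySem.Chars.isIn [c] pvCharset = false) := by
        simp [pv_isIn_false_iff, h]
      by_cases h2 : PySem.Chars.find pvCharset [d] < 0
      · simp [descA_loop, descB_vals, hin, h, (pv_isIn_false_iff d).2 h2, h2]
      · have hin2 : ¬ (PySem.Chars.isIn [d] pvCharset = false) := by
          simp [pv_isIn_false_iff, h2]
        simp [descA_loop, descB_vals, descB_chunks, hin, h, hin2, h2]
  | case4 c d e rest ih =>
    intro symbols
    by_cases h : PySem.Chars.find pvCharset [c] < 0
    · simp [descA_loop, descB_vals, (pv_isIn_false_iff c).2 h, h]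
    · have hin : ¬ (PySem.Chars.isIn [c] pvCharset = false) := by
        simp [pv_isIn_false_iff, h]
      by_cases h2 : PySem.Chars.find pvCharset [d] < 0
      · simp [descA_loop, descB_vals, hin, h, (pv_isIn_false_iff d).2 h2, h2]
      · have hin2 : ¬ (PySem.Chars.isIn [d] pvCharset = false) := by
          simp [pv_isIn_false_iff, h2]
        by_cases h3 : PySem.Chars.find pvCharset [e] < 0
        · simp [descA_loop, descB_vals, hin, h, hin2, h2, (pv_isIn_false_iff e).2 h3, h3]
        · have hin3 : ¬ (PySem.Chars.isIn [e] pvCharset = false) := by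
            simp [pv_isIn_false_iff, h3]
          simp [descA_loop, descB_vals, hin, h, hin2, h2, hin3, h3, ih, Option.map_map]
          cases descB_vals rest <;> simp [descB_chunks]

-- ===== VERDICT (by name: the statement is the Claim_ definition above) =====
theorem descsum_expand_py_spec : Claim_equal_descsum_expand_py := by
  intro s _
  unfold Spec_descsum_expand_py descsum_expand_py descsum_expand_py_alt
  simpa using pv_key s.toList []
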